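-- pv_equiv track=rewrite | github.com/cdccnleo/RQA2025 | src/infrastructure/config/tools/infrastructure_index.py | get_interface_documentation_status
-- ===== SOURCE A (Python) =====
-- INTERFACE_DOCUMENTATION_STATUS = {
--     'configuration': {
--         'documented': [],
--         'partially_documented': [],
--         'not_documented': [
--             'IConfigurationManager',
--             'IConfigurationProvider',
--             'IConfigurationValidator',
--             'IConfigurationLoader',
--             'IConfigurationStore',
--             'IConfigurationCache',
--             'IConfigurationSecurity',
--             'IConfigurationMigration',
--             'IConfigurationBackup',
--             'IConfigurationRestore',
--             'IConfigurationSync',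
--             'IConfigurationAudit',
--             'IConfigurationTemplate',
--             'IConfigurationSchema',
--             'IConfigurationRule',
--             'IConfigurationPolicy',
--             'IConfigurationCompliance',
--             'IConfigurationGovernance',
--             'IConfigurationLifecycle',
--             'IConfigurationVersioning'
--         ]
--     },
--     'monitoring': {
--         'documented': [],
--         'partially_documented': [],
--         'not_documented': [
--             'IMonitor',
--             'IMonitorFactory',
--             'IPerformanceMonitor',
--             'IBusinessMetricsMonitor',
--             'ISystemMonitor',
--             'IApplicationMonitor',
--             'IAlertManager',
--             'IMetricsStore',
--             'IAlertStore',
--             'IMonitorPlugin',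
--             'IStorageMonitorPlugin',
--             'IDisasterMonitorPlugin',
--             'IModelMonitorPlugin',
--             'IBehaviorMonitorPlugin',
--             'IMonitoringService',
--             'IMonitorDecorator',
--             'IMonitoringIntegration',
--             'IMonitoringPerformanceOptimizer'
--         ]
--     },
--     'cache': {
--         'documented': [],
--         'partially_documented': [],
--         'not_documented': [
--             'ICache',
--             'ICacheManager',
--             'IL1Cache',
--             'IL2Cache',
--             'IL3Cache',
--             'IL4Cache',
--             'ILRUCache',
--             'ILFUCache',
--             'ITTLCache',
--             'ICompressionCache',
--             'IEncryptionCache',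
--             'ITaggedCache',
--             'IIntelligentCache',
--             'IAdaptiveCache',
--             'ICacheFactory',
--             'ICacheDecorator',
--             'ICacheMonitor',
--             'ICacheOptimizer',
--             'ICacheIntegration',
--             'ICacheSecurity'
--         ]
--     }
-- }
--
-- def get_interface_documentation_status(interface_name: str) -> dict:
--
--     for category, status in INTERFACE_DOCUMENTATION_STATUS.items():
--         if interface_name in status['documented']:
--             return {'status': 'documented', 'category': category}
--         elif interface_name in status['partially_documented']:
--             return {'status': 'partially_documented', 'category': category}
--         elif interface_name in status['not_documented']:
--             return {'status': 'not_documented', 'category': category}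
--     return {'status': 'unknown', 'category': 'unknown'}
-- ===== SOURCE B (Python) =====
-- # B: a flat (category, status, names) group list and a reverse index dict built once
-- # (first occurrence wins), so each call is a single keyed lookup returning a fresh dict.
--
-- _GROUPS = [
--     ('configuration', 'documented', []),
--     ('configuration', 'partially_documented', []),
--     ('configuration', 'not_documented', [
--         'IConfigurationManager', 'IConfigurationProvider', 'IConfigurationValidator',
--         'IConfigurationLoader', 'IConfigurationStore', 'IConfigurationCache',
--         'IConfigurationSecurity', 'IConfigurationMigration', 'IConfigurationBackup',
--         'IConfigurationRestore', 'IConfigurationSync', 'IConfigurationAudit',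
--         'IConfigurationTemplate', 'IConfigurationSchema', 'IConfigurationRule',
--         'IConfigurationPolicy', 'IConfigurationCompliance', 'IConfigurationGovernance',
--         'IConfigurationLifecycle', 'IConfigurationVersioning']),
--     ('monitoring', 'documented', []),
--     ('monitoring', 'partially_documented', []),
--     ('monitoring', 'not_documented', [
--         'IMonitor', 'IMonitorFactory', 'IPerformanceMonitor', 'IBusinessMetricsMonitor',
--         'ISystemMonitor', 'IApplicationMonitor', 'IAlertManager', 'IMetricsStore',
--         'IAlertStore', 'IMonitorPlugin', 'IStorageMonitorPlugin', 'IDisasterMonitorPlugin',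
--         'IModelMonitorPlugin', 'IBehaviorMonitorPlugin', 'IMonitoringService',
--         'IMonitorDecorator', 'IMonitoringIntegration', 'IMonitoringPerformanceOptimizer']),
--     ('cache', 'documented', []),
--     ('cache', 'partially_documented', []),
--     ('cache', 'not_documented', [
--         'ICache', 'ICacheManager', 'IL1Cache', 'IL2Cache', 'IL3Cache', 'IL4Cache',
--         'ILRUCache', 'ILFUCache', 'ITTLCache', 'ICompressionCache', 'IEncryptionCache',
--         'ITaggedCache', 'IIntelligentCache', 'IAdaptiveCache', 'ICacheFactory',
--         'ICacheDecorator', 'ICacheMonitor', 'ICacheOptimizer', 'ICacheIntegration',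
--         'ICacheSecurity']),
-- ]
--
-- _INDEX = {}
-- for _category, _status, _names in _GROUPS:
--     for _name in _names:
--         if _name not in _INDEX:
--             _INDEX[_name] = (_status, _category)
--
--
-- def get_interface_documentation_status(interface_name: str) -> dict:
--     status, category = _INDEX.get(interface_name, ('unknown', 'unknown'))
--     return {'status': status, 'category': category}
-- ===== Notes on version B (the rewrite author's own statement) =====
-- stated objective: faster
-- what changed: Flattens the nested category/status-dict table into a flat group list and builds a module-level reverse index dict once (name -> (status, category), first occurrence wins), so each call is a single hash lookup returning a fresh dict instead of a nested scan over all lists.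
import Mathlib
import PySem

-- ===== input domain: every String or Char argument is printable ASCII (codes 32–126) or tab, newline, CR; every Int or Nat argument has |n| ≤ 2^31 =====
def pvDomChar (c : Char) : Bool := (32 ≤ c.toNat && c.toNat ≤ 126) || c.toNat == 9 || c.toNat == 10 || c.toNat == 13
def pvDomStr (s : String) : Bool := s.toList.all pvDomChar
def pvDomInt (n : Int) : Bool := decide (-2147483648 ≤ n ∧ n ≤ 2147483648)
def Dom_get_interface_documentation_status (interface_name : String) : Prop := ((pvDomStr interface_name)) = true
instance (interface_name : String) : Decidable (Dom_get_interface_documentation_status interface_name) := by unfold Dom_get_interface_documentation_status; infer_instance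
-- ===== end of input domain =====

-- B replaces A's per-call nested scan over the category dicts by a flat group list and a
-- reverse index built once (name -> (status, category), first-wins) with one lookup per call.

-- ===== PORT A =====
-- A's module-level constant INTERFACE_DOCUMENTATION_STATUS; inner dicts as PySem.Dict.
def pvConfiguration : PySem.Dict String (List String) :=
  PySem.Dict.ofList [("documented", []), ("partially_documented", []), ("not_documented", ["IConfigurationManager", "IConfigurationProvider", "IConfigurationValidator", "IConfigurationLoader", "IConfigurationStore", "IConfigurationCache", "IConfigurationSecurity", "IConfigurationMigration", "IConfigurationBackup", "IConfigurationRestore", "IConfigurationSync", "IConfigurationAudit", "IConfigurationTemplate", "IConfigurationSchema", "IConfigurationRule", "IConfigurationPolicy", "IConfigurationCompliance", "IConfigurationGovernance", "IConfigurationLifecycle", "IConfigurationVersioning"])]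

def pvMonitoring : PySem.Dict String (List String) :=
  PySem.Dict.ofList [("documented", []), ("partially_documented", []), ("not_documented", ["IMonitor", "IMonitorFactory", "IPerformanceMonitor", "IBusinessMetricsMonitor", "ISystemMonitor", "IApplicationMonitor", "IAlertManager", "IMetricsStore", "IAlertStore", "IMonitorPlugin", "IStorageMonitorPlugin", "IDisasterMonitorPlugin", "IModelMonitorPlugin", "IBehaviorMonitorPlugin", "IMonitoringService", "IMonitorDecorator", "IMonitoringIntegration", "IMonitoringPerformanceOptimizer"])]

def pvCache : PySem.Dict String (List String) :=
  PySem.Dict.ofList [("documented", []), ("partially_documented", []), ("not_documented", ["ICache", "ICacheManager", "IL1Cache", "IL2Cache", "IL3Cache", "IL4Cache", "ILRUCache", "ILFUCache", "ITTLCache", "ICompressionCache", "IEncryptionCache", "ITaggedCache", "IIntelligentCache", "IAdaptiveCache", "ICacheFactory", "ICacheDecorator", "ICacheMonitor", "ICacheOptimizer", "ICacheIntegration", "ICacheSecurity"])]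

def pvTable : List (String × PySem.Dict String (List String)) :=
  [("configuration", pvConfiguration), ("monitoring", pvMonitoring), ("cache", pvCache)]

-- A's for-loop over .items() with early return; status['documented'] etc. are
-- exact as getD since every status dict carries all three keys.
def pvScan (interface_name : String) : List (String × PySem.Dict String (List String)) → List (String × String)
  | [] => [("status", "unknown"), ("category", "unknown")]
  | (category, status) :: rest =>
    if (status.getD "documented" []).contains interface_name then
      [("status", "documented"), ("category", category)]
    else if (status.getD "partially_documented" []).contains interface_name then
      [("status", "partially_documented"), ("category", category)]
    else if (status.getD "not_documented" []).contains interface_name then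
      [("status", "not_documented"), ("category", category)]
    else pvScan interface_name rest

def get_interface_documentation_status (interface_name : String) : List (String × String) :=
  pvScan interface_name pvTable

-- ===== PORT B =====
-- Source B's flat module-level group list _GROUPS: (category, status, names) triples.
def pvGroups : List (String × String × List String) :=
  [("configuration", "documented", []),
   ("configuration", "partially_documented", []),
   ("configuration", "not_documented", ["IConfigurationManager", "IConfigurationProvider", "IConfigurationValidator", "IConfigurationLoader", "IConfigurationStore", "IConfigurationCache", "IConfigurationSecurity", "IConfigurationMigration", "IConfigurationBackup", "IConfigurationRestore", "IConfigurationSync", "IConfigurationAudit", "IConfigurationTemplate", "IConfigurationSchema", "IConfigurationRule", "IConfigurationPolicy", "IConfigurationCompliance", "IConfigurationGovernance", "IConfigurationLifecycle", "IConfigurationVersioning"]),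
   ("monitoring", "documented", []),
   ("monitoring", "partially_documented", []),
   ("monitoring", "not_documented", ["IMonitor", "IMonitorFactory", "IPerformanceMonitor", "IBusinessMetricsMonitor", "ISystemMonitor", "IApplicationMonitor", "IAlertManager", "IMetricsStore", "IAlertStore", "IMonitorPlugin", "IStorageMonitorPlugin", "IDisasterMonitorPlugin", "IModelMonitorPlugin", "IBehaviorMonitorPlugin", "IMonitoringService", "IMonitorDecorator", "IMonitoringIntegration", "IMonitoringPerformanceOptimizer"]),
   ("cache", "documented", []),
   ("cache", "partially_documented", []),
   ("cache", "not_documented", ["ICache", "ICacheManager", "IL1Cache", "IL2Cache", "IL3Cache", "IL4Cache", "ILRUCache", "ILFUCache", "ITTLCache", "ICompressionCache", "IEncryptionCache", "ITaggedCache", "IIntelligentCache", "IAdaptiveCache", "ICacheFactory", "ICacheDecorator", "ICacheMonitor", "ICacheOptimizer", "ICacheIntegration", "ICacheSecurity"])]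

-- Source B's index-building double for-loop with the 'if name not in _INDEX' guard (first-wins).
def pvIndex : PySem.Dict String (String × String) :=
  pvGroups.foldl (fun d g =>
      g.2.2.foldl (fun d name =>
        if d.contains name then d else d.insert name (g.2.1, g.1)) d)
    PySem.Dict.empty

def get_interface_documentation_status_alt (interface_name : String) : List (String × String) :=
  let p := pvIndex.getD interface_name ("unknown", "unknown")
  [("status", p.1), ("category", p.2)]

-- ===== PRECONDITION & SPEC =====
def Spec_get_interface_documentation_status (interface_name : String) (out : List (String × String)) : Prop := out = get_interface_documentation_status_alt interface_name
instance (interface_name : String) (out : List (String × String)) : Decidable (Spec_get_interface_documentation_status interface_name out) := by unfold Spec_get_interface_documentation_status; infer_instance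

-- ===== CLAIM (what is proved, stated in full; the proofs are below) =====
def Claim_equal_get_interface_documentation_status : Prop := ∀ (interface_name : String), Dom_get_interface_documentation_status interface_name → Spec_get_interface_documentation_status interface_name (get_interface_documentation_status interface_name)

-- ===== LEMMAS AND PROOFS =====
-- B's index, evaluated once to its literal item list
set_option maxRecDepth 40000 in
theorem pvIndex_eq : pvIndex = PySem.Dict.mk
  [("IConfigurationManager", ("not_documented", "configuration")),
   ("IConfigurationProvider", ("not_documented", "configuration")),
   ("IConfigurationValidator", ("not_documented", "configuration")),
   ("IConfigurationLoader", ("not_documented", "configuration")),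
   ("IConfigurationStore", ("not_documented", "configuration")),
   ("IConfigurationCache", ("not_documented", "configuration")),
   ("IConfigurationSecurity", ("not_documented", "configuration")),
   ("IConfigurationMigration", ("not_documented", "configuration")),
   ("IConfigurationBackup", ("not_documented", "configuration")),
   ("IConfigurationRestore", ("not_documented", "configuration")),
   ("IConfigurationSync", ("not_documented", "configuration")),
   ("IConfigurationAudit", ("not_documented", "configuration")),
   ("IConfigurationTemplate", ("not_documented", "configuration")),
   ("IConfigurationSchema", ("not_documented", "configuration")),
   ("IConfigurationRule", ("not_documented", "configuration")),
   ("IConfigurationPolicy", ("not_documented", "configuration")),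
   ("IConfigurationCompliance", ("not_documented", "configuration")),
   ("IConfigurationGovernance", ("not_documented", "configuration")),
   ("IConfigurationLifecycle", ("not_documented", "configuration")),
   ("IConfigurationVersioning", ("not_documented", "configuration")),
   ("IMonitor", ("not_documented", "monitoring")),
   ("IMonitorFactory", ("not_documented", "monitoring")),
   ("IPerformanceMonitor", ("not_documented", "monitoring")),
   ("IBusinessMetricsMonitor", ("not_documented", "monitoring")),
   ("ISystemMonitor", ("not_documented", "monitoring")),
   ("IApplicationMonitor", ("not_documented", "monitoring")),
   ("IAlertManager", ("not_documented", "monitoring")),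
   ("IMetricsStore", ("not_documented", "monitoring")),
   ("IAlertStore", ("not_documented", "monitoring")),
   ("IMonitorPlugin", ("not_documented", "monitoring")),
   ("IStorageMonitorPlugin", ("not_documented", "monitoring")),
   ("IDisasterMonitorPlugin", ("not_documented", "monitoring")),
   ("IModelMonitorPlugin", ("not_documented", "monitoring")),
   ("IBehaviorMonitorPlugin", ("not_documented", "monitoring")),
   ("IMonitoringService", ("not_documented", "monitoring")),
   ("IMonitorDecorator", ("not_documented", "monitoring")),
   ("IMonitoringIntegration", ("not_documented", "monitoring")),
   ("IMonitoringPerformanceOptimizer", ("not_documented", "monitoring")),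
   ("ICache", ("not_documented", "cache")),
   ("ICacheManager", ("not_documented", "cache")),
   ("IL1Cache", ("not_documented", "cache")),
   ("IL2Cache", ("not_documented", "cache")),
   ("IL3Cache", ("not_documented", "cache")),
   ("IL4Cache", ("not_documented", "cache")),
   ("ILRUCache", ("not_documented", "cache")),
   ("ILFUCache", ("not_documented", "cache")),
   ("ITTLCache", ("not_documented", "cache")),
   ("ICompressionCache", ("not_documented", "cache")),
   ("IEncryptionCache", ("not_documented", "cache")),
   ("ITaggedCache", ("not_documented", "cache")),
   ("IIntelligentCache", ("not_documented", "cache")),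
   ("IAdaptiveCache", ("not_documented", "cache")),
   ("ICacheFactory", ("not_documented", "cache")),
   ("ICacheDecorator", ("not_documented", "cache")),
   ("ICacheMonitor", ("not_documented", "cache")),
   ("ICacheOptimizer", ("not_documented", "cache")),
   ("ICacheIntegration", ("not_documented", "cache")),
   ("ICacheSecurity", ("not_documented", "cache"))] := by decide

-- the three status lookups of each category dict of A's table, evaluated
theorem pvConfiguration_doc : pvConfiguration.getD "documented" [] = [] := by decide
theorem pvConfiguration_part : pvConfiguration.getD "partially_documented" [] = [] := by decide
theorem pvMonitoring_doc : pvMonitoring.getD "documented" [] = [] := by decide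
theorem pvMonitoring_part : pvMonitoring.getD "partially_documented" [] = [] := by decide
theorem pvCache_doc : pvCache.getD "documented" [] = [] := by decide
theorem pvCache_part : pvCache.getD "partially_documented" [] = [] := by decide
set_option maxRecDepth 40000 in
theorem pvConfiguration_not : pvConfiguration.getD "not_documented" [] = ["IConfigurationManager", "IConfigurationProvider", "IConfigurationValidator", "IConfigurationLoader", "IConfigurationStore", "IConfigurationCache", "IConfigurationSecurity", "IConfigurationMigration", "IConfigurationBackup", "IConfigurationRestore", "IConfigurationSync", "IConfigurationAudit", "IConfigurationTemplate", "IConfigurationSchema", "IConfigurationRule", "IConfigurationPolicy", "IConfigurationCompliance", "IConfigurationGovernance", "IConfigurationLifecycle", "IConfigurationVersioning"] := by decide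
set_option maxRecDepth 40000 in
theorem pvMonitoring_not : pvMonitoring.getD "not_documented" [] = ["IMonitor", "IMonitorFactory", "IPerformanceMonitor", "IBusinessMetricsMonitor", "ISystemMonitor", "IApplicationMonitor", "IAlertManager", "IMetricsStore", "IAlertStore", "IMonitorPlugin", "IStorageMonitorPlugin", "IDisasterMonitorPlugin", "IModelMonitorPlugin", "IBehaviorMonitorPlugin", "IMonitoringService", "IMonitorDecorator", "IMonitoringIntegration", "IMonitoringPerformanceOptimizer"] := by decide
set_option maxRecDepth 40000 in
theorem pvCache_not : pvCache.getD "not_documented" [] = ["ICache", "ICacheManager", "IL1Cache", "IL2Cache", "IL3Cache", "IL4Cache", "ILRUCache", "ILFUCache", "ITTLCache", "ICompressionCache", "IEncryptionCache", "ITaggedCache", "IIntelligentCache", "IAdaptiveCache", "ICacheFactory", "ICacheDecorator", "ICacheMonitor", "ICacheOptimizer", "ICacheIntegration", "ICacheSecurity"] := by decide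

set_option maxRecDepth 40000 in
theorem pv_main (interface_name : String) :
    get_interface_documentation_status interface_name = get_interface_documentation_status_alt interface_name := by
  by_cases h0 : interface_name = "IConfigurationManager"
  · subst h0; simp only [get_interface_documentation_status_alt, pvIndex_eq]; decide
  by_cases h1 : interface_name = "IConfigurationProvider"
  · subst h1; simp only [get_interface_documentation_status_alt, pvIndex_eq]; decide
  by_cases h2 : interface_name = "IConfigurationValidator"
  · subst h2; simp only [get_interface_documentation_status_alt, pvIndex_eq]; decide
  by_cases h3 : interface_name = "IConfigurationLoader"
  · subst h3; simp only [get_interface_documentation_status_alt, pvIndex_eq]; decide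
  by_cases h4 : interface_name = "IConfigurationStore"
  · subst h4; simp only [get_interface_documentation_status_alt, pvIndex_eq]; decide
  by_cases h5 : interface_name = "IConfigurationCache"
  · subst h5; simp only [get_interface_documentation_status_alt, pvIndex_eq]; decide
  by_cases h6 : interface_name = "IConfigurationSecurity"
  · subst h6; simp only [get_interface_documentation_status_alt, pvIndex_eq]; decide
  by_cases h7 : interface_name = "IConfigurationMigration"
  · subst h7; simp only [get_interface_documentation_status_alt, pvIndex_eq]; decide
  by_cases h8 : interface_name = "IConfigurationBackup"
  · subst h8; simp only [get_interface_documentation_status_alt, pvIndex_eq]; decide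
  by_cases h9 : interface_name = "IConfigurationRestore"
  · subst h9; simp only [get_interface_documentation_status_alt, pvIndex_eq]; decide
  by_cases h10 : interface_name = "IConfigurationSync"
  · subst h10; simp only [get_interface_documentation_status_alt, pvIndex_eq]; decide
  by_cases h11 : interface_name = "IConfigurationAudit"
  · subst h11; simp only [get_interface_documentation_status_alt, pvIndex_eq]; decide
  by_cases h12 : interface_name = "IConfigurationTemplate"
  · subst h12; simp only [get_interface_documentation_status_alt, pvIndex_eq]; decide
  by_cases h13 : interface_name = "IConfigurationSchema"
  · subst h13; simp only [get_interface_documentation_status_alt, pvIndex_eq]; decide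
  by_cases h14 : interface_name = "IConfigurationRule"
  · subst h14; simp only [get_interface_documentation_status_alt, pvIndex_eq]; decide
  by_cases h15 : interface_name = "IConfigurationPolicy"
  · subst h15; simp only [get_interface_documentation_status_alt, pvIndex_eq]; decide
  by_cases h16 : interface_name = "IConfigurationCompliance"
  · subst h16; simp only [get_interface_documentation_status_alt, pvIndex_eq]; decide
  by_cases h17 : interface_name = "IConfigurationGovernance"
  · subst h17; simp only [get_interface_documentation_status_alt, pvIndex_eq]; decide
  by_cases h18 : interface_name = "IConfigurationLifecycle"
  · subst h18; simp only [get_interface_documentation_status_alt, pvIndex_eq]; decide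
  by_cases h19 : interface_name = "IConfigurationVersioning"
  · subst h19; simp only [get_interface_documentation_status_alt, pvIndex_eq]; decide
  by_cases h20 : interface_name = "IMonitor"
  · subst h20; simp only [get_interface_documentation_status_alt, pvIndex_eq]; decide
  by_cases h21 : interface_name = "IMonitorFactory"
  · subst h21; simp only [get_interface_documentation_status_alt, pvIndex_eq]; decide
  by_cases h22 : interface_name = "IPerformanceMonitor"
  · subst h22; simp only [get_interface_documentation_status_alt, pvIndex_eq]; decide
  by_cases h23 : interface_name = "IBusinessMetricsMonitor"
  · subst h23; simp only [get_interface_documentation_status_alt, pvIndex_eq]; decide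
  by_cases h24 : interface_name = "ISystemMonitor"
  · subst h24; simp only [get_interface_documentation_status_alt, pvIndex_eq]; decide
  by_cases h25 : interface_name = "IApplicationMonitor"
  · subst h25; simp only [get_interface_documentation_status_alt, pvIndex_eq]; decide
  by_cases h26 : interface_name = "IAlertManager"
  · subst h26; simp only [get_interface_documentation_status_alt, pvIndex_eq]; decide
  by_cases h27 : interface_name = "IMetricsStore"
  · subst h27; simp only [get_interface_documentation_status_alt, pvIndex_eq]; decide
  by_cases h28 : interface_name = "IAlertStore"
  · subst h28; simp only [get_interface_documentation_status_alt, pvIndex_eq]; decide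
  by_cases h29 : interface_name = "IMonitorPlugin"
  · subst h29; simp only [get_interface_documentation_status_alt, pvIndex_eq]; decide
  by_cases h30 : interface_name = "IStorageMonitorPlugin"
  · subst h30; simp only [get_interface_documentation_status_alt, pvIndex_eq]; decide
  by_cases h31 : interface_name = "IDisasterMonitorPlugin"
  · subst h31; simp only [get_interface_documentation_status_alt, pvIndex_eq]; decide
  by_cases h32 : interface_name = "IModelMonitorPlugin"
  · subst h32; simp only [get_interface_documentation_status_alt, pvIndex_eq]; decide
  by_cases h33 : interface_name = "IBehaviorMonitorPlugin"
  · subst h33; simp only [get_interface_documentation_status_alt, pvIndex_eq]; decide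
  by_cases h34 : interface_name = "IMonitoringService"
  · subst h34; simp only [get_interface_documentation_status_alt, pvIndex_eq]; decide
  by_cases h35 : interface_name = "IMonitorDecorator"
  · subst h35; simp only [get_interface_documentation_status_alt, pvIndex_eq]; decide
  by_cases h36 : interface_name = "IMonitoringIntegration"
  · subst h36; simp only [get_interface_documentation_status_alt, pvIndex_eq]; decide
  by_cases h37 : interface_name = "IMonitoringPerformanceOptimizer"
  · subst h37; simp only [get_interface_documentation_status_alt, pvIndex_eq]; decide
  by_cases h38 : interface_name = "ICache"
  · subst h38; simp only [get_interface_documentation_status_alt, pvIndex_eq]; decide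
  by_cases h39 : interface_name = "ICacheManager"
  · subst h39; simp only [get_interface_documentation_status_alt, pvIndex_eq]; decide
  by_cases h40 : interface_name = "IL1Cache"
  · subst h40; simp only [get_interface_documentation_status_alt, pvIndex_eq]; decide
  by_cases h41 : interface_name = "IL2Cache"
  · subst h41; simp only [get_interface_documentation_status_alt, pvIndex_eq]; decide
  by_cases h42 : interface_name = "IL3Cache"
  · subst h42; simp only [get_interface_documentation_status_alt, pvIndex_eq]; decide
  by_cases h43 : interface_name = "IL4Cache"
  · subst h43; simp only [get_interface_documentation_status_alt, pvIndex_eq]; decide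
  by_cases h44 : interface_name = "ILRUCache"
  · subst h44; simp only [get_interface_documentation_status_alt, pvIndex_eq]; decide
  by_cases h45 : interface_name = "ILFUCache"
  · subst h45; simp only [get_interface_documentation_status_alt, pvIndex_eq]; decide
  by_cases h46 : interface_name = "ITTLCache"
  · subst h46; simp only [get_interface_documentation_status_alt, pvIndex_eq]; decide
  by_cases h47 : interface_name = "ICompressionCache"
  · subst h47; simp only [get_interface_documentation_status_alt, pvIndex_eq]; decide
  by_cases h48 : interface_name = "IEncryptionCache"
  · subst h48; simp only [get_interface_documentation_status_alt, pvIndex_eq]; decide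
  by_cases h49 : interface_name = "ITaggedCache"
  · subst h49; simp only [get_interface_documentation_status_alt, pvIndex_eq]; decide
  by_cases h50 : interface_name = "IIntelligentCache"
  · subst h50; simp only [get_interface_documentation_status_alt, pvIndex_eq]; decide
  by_cases h51 : interface_name = "IAdaptiveCache"
  · subst h51; simp only [get_interface_documentation_status_alt, pvIndex_eq]; decide
  by_cases h52 : interface_name = "ICacheFactory"
  · subst h52; simp only [get_interface_documentation_status_alt, pvIndex_eq]; decide
  by_cases h53 : interface_name = "ICacheDecorator"
  · subst h53; simp only [get_interface_documentation_status_alt, pvIndex_eq]; decide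
  by_cases h54 : interface_name = "ICacheMonitor"
  · subst h54; simp only [get_interface_documentation_status_alt, pvIndex_eq]; decide
  by_cases h55 : interface_name = "ICacheOptimizer"
  · subst h55; simp only [get_interface_documentation_status_alt, pvIndex_eq]; decide
  by_cases h56 : interface_name = "ICacheIntegration"
  · subst h56; simp only [get_interface_documentation_status_alt, pvIndex_eq]; decide
  by_cases h57 : interface_name = "ICacheSecurity"
  · subst h57; simp only [get_interface_documentation_status_alt, pvIndex_eq]; decide
  simp only [get_interface_documentation_status_alt, pvIndex_eq]
  rw [PySem.Dict.getD_of_not_contains]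
  · simp [get_interface_documentation_status, pvScan, pvTable,
      pvConfiguration_doc, pvConfiguration_part, pvConfiguration_not,
      pvMonitoring_doc, pvMonitoring_part, pvMonitoring_not,
      pvCache_doc, pvCache_part, pvCache_not, h0, h1, h2, h3, h4, h5, h6, h7, h8, h9, h10, h11, h12, h13, h14, h15, h16, h17, h18, h19, h20, h21, h22, h23, h24, h25, h26, h27, h28, h29, h30, h31, h32, h33, h34, h35, h36, h37, h38, h39, h40, h41, h42, h43, h44, h45, h46, h47, h48, h49, h50, h51, h52, h53, h54, h55, h56, h57]
  · rw [PySem.Dict.contains_eq_decide_mem_keys]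
    simp [h0, h1, h2, h3, h4, h5, h6, h7, h8, h9, h10, h11, h12, h13, h14, h15, h16, h17, h18, h19, h20, h21, h22, h23, h24, h25, h26, h27, h28, h29, h30, h31, h32, h33, h34, h35, h36, h37, h38, h39, h40, h41, h42, h43, h44, h45, h46, h47, h48, h49, h50, h51, h52, h53, h54, h55, h56, h57]

-- ===== VERDICT (by name: the statement is the Claim_ definition above) =====
theorem get_interface_documentation_status_spec : Claim_equal_get_interface_documentation_status := by
  intro interface_name _
  exact pv_main interface_name
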